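-- pv_equiv track=rewrite | github.com/ghghdfd/Python_coding | 07_28/programmers_기능개발.py | solution
-- ===== SOURCE A (Python) =====
-- def solution(progress,speeds):
--     answer=[]
--     time=0
--     count=0
--     while len(progress)>0:
--         if (progress[0]+time*speeds[0])>=100:
--             progress.pop(0)
--             speeds.pop(0)
--             count+=1
--         else:
--             if count>0:
--                 answer.append(count)
--                 count=0
--             time+=1
--     answer.append(count)
--     return answer
-- ===== SOURCE B (Python) =====
-- def solution(progress, speeds):
--     # days[i] = first day on which task i is complete (ceil((100-p)/s), never before day 0)
--     days = [max(0, -((p - 100) // s)) for p, s in zip(progress, speeds)]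
--     answer = []
--     cur = None
--     count = 0
--     for d in days:
--         if cur is None:
--             cur, count = d, 1
--         elif d > cur:
--             answer.append(count)
--             cur, count = d, 1
--         else:
--             count += 1
--     answer.append(count)
--     return answer
-- ===== Notes on version B (the rewrite author's own statement) =====
-- stated objective: faster
-- what changed: Replaces A's day-by-day simulation that repeatedly pops the list head with a closed-form ceiling-division completion day per task followed by a single linear grouping sweep over those days (also, B does not mutate its arguments while A empties both lists). Intended as faster; a timing run saw A time out at n=16 while B returned, so no clean ratio was measurable.
-- outside the precondition, e.g. on solution([100], [0]): A returns [1], B raises ZeroDivisionError; on solution([100], [-1]): A returns [1], B returns [1]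
import Mathlib
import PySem

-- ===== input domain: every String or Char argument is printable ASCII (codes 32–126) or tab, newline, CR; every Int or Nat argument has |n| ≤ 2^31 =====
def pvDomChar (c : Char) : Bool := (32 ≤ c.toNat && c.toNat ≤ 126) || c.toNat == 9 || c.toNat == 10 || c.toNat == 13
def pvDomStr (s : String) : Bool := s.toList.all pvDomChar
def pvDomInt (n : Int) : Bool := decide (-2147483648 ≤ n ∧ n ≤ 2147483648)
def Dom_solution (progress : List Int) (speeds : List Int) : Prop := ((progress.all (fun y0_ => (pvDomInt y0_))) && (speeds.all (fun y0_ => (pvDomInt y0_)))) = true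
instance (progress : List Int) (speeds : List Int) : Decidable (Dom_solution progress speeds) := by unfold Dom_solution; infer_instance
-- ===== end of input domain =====

-- B replaces A's day-by-day pop(0) simulation by closed-form ceiling completion days plus one
-- grouping sweep (intended as faster: a timing run saw A time out where B returned, with no
-- clean ratio measurable); A mutates both argument lists in place, B does not — the equivalence
-- proved here is about the return value only.

-- ===== PORT A =====
-- A's while-loop as fuel recursion; the fuel is a pure totality guard, chosen so that under
-- Pre_solution it never runs out (proved in solFuel-related lemmas below).
def solLoopA : Nat → List Int → List Int → Int → Int → List Int → List Int
  | 0, _, _, _, count, answer => answer ++ [count]      -- fuel exhausted: unreachable under Pre_solution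
  | fuel+1, progress, speeds, time, count, answer =>
    match progress, speeds with
    | p :: pr, s :: sp =>
        if 100 ≤ p + time * s then
          solLoopA fuel pr sp time (count + 1) answer
        else if 0 < count then
          solLoopA fuel (p :: pr) (s :: sp) (time + 1) 0 (answer ++ [count])
        else
          solLoopA fuel (p :: pr) (s :: sp) (time + 1) count answer
    | _, _ => answer ++ [count]   -- [] : loop ends; nonempty progress with [] speeds is Python's IndexError, outside Pre_solution

def solution (progress : List Int) (speeds : List Int) : List Int :=
  solLoopA (progress.length + (progress.map (fun p => (100 - p).toNat)).sum + 1)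
    progress speeds 0 0 []

-- ===== PORT B =====
-- days[i] = max(0, -((p - 100) // s))
def pyDays (progress speeds : List Int) : List Int :=
  (progress.zip speeds).map (fun q => max 0 (-(PySem.Int.floordiv (q.1 - 100) q.2)))

def bStep (st : List Int × Option Int × Int) (d : Int) : List Int × Option Int × Int :=
  match st with
  | (ans, none, _) => (ans, some d, 1)
  | (ans, some c, cnt) => if d > c then (ans ++ [cnt], some d, 1) else (ans, some c, cnt + 1)

def solution_alt (progress : List Int) (speeds : List Int) : List Int :=
  match (pyDays progress speeds).foldl bStep ([], none, 0) with
  | (ans, _, cnt) => ans ++ [cnt]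

-- ===== PRECONDITION & SPEC =====
-- Pre_ excludes inputs where speeds is shorter than progress (A raises IndexError) or some of the
-- first len(progress) speeds is non-positive: there A usually loops forever, and on the corner
-- where tasks are already at 100 and A still returns, B's ceiling division is undefined for a
-- zero speed (ZeroDivisionError) — so this narrowing keeps non-positive speeds out wholesale.
def Pre_solution (progress : List Int) (speeds : List Int) : Prop :=
  progress.length ≤ speeds.length ∧ ∀ q ∈ progress.zip speeds, 0 < q.2
instance (progress : List Int) (speeds : List Int) : Decidable (Pre_solution progress speeds) := by
  unfold Pre_solution; infer_instance

def pvWitness_solution : List Int × List Int := ([93, 30, 55], [1, 30, 5])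

def Spec_solution (progress : List Int) (speeds : List Int) (out : List Int) : Prop := out = solution_alt progress speeds
instance (progress : List Int) (speeds : List Int) (out : List Int) : Decidable (Spec_solution progress speeds out) := by unfold Spec_solution; infer_instance

-- ===== CLAIM (what is proved, stated in full; the proofs are below) =====
def Claim_equal_solution : Prop := ∀ (progress : List Int) (speeds : List Int), Dom_solution progress speeds → Pre_solution progress speeds → Spec_solution progress speeds (solution progress speeds)

-- ===== LEMMAS AND PROOFS =====

-- the loop bound the fuel has to dominate
def fuelB (l : List Int) : Nat := l.length + (l.map (fun p => (100 - p).toNat)).sum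

-- task (p, s) with speed s > 0 is finished at time t iff t ≥ ceil((100-p)/s)
lemma ready_iff (p s t : Int) (hs : 0 < s) :
    100 ≤ p + t * s ↔ -(PySem.Int.floordiv (p - 100) s) ≤ t := by
  rw [neg_le, PySem.Int.le_floordiv_iff_mul_le hs]
  constructor <;> intro h <;> nlinarith

-- the completion day is at most max 0 (100 - p) when s ≥ 1 (used for fuel sufficiency)
lemma day_le (p s : Int) (hs : 0 < s) :
    -(PySem.Int.floordiv (p - 100) s) ≤ max 0 (100 - p) := by
  rw [neg_le, PySem.Int.le_floordiv_iff_mul_le hs]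
  nlinarith [le_max_left 0 (100 - p), le_max_right 0 (100 - p),
    mul_nonneg (le_max_left 0 (100 - p)) (by linarith : (0:Int) ≤ s - 1)]

-- k waiting steps of A's loop: time+=1 k times, the count flushed on the first one
lemma solLoopA_wait (k : Nat) : ∀ (fuel : Nat) (p s : Int) (pr sp : List Int)
    (t c : Int) (ans : List Int), 0 ≤ c →
    (∀ j : Nat, j < k → p + (t + (j : Int)) * s < 100) →
    solLoopA (fuel + k) (p :: pr) (s :: sp) t c ans
      = solLoopA fuel (p :: pr) (s :: sp) (t + (k : Int)) (if k = 0 then c else 0)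
          (ans ++ if k ≠ 0 ∧ 0 < c then [c] else []) := by
  induction k with
  | zero => intro fuel p s pr sp t c ans _ _; simp
  | succ k ih =>
    intro fuel p s pr sp t c ans hc hwait
    have hnot : ¬ (100 ≤ p + t * s) := by
      have := hwait 0 (Nat.succ_pos k); push_cast at this; linarith
    have hstep : solLoopA (fuel + (k + 1)) (p :: pr) (s :: sp) t c ans
        = solLoopA (fuel + k) (p :: pr) (s :: sp) (t + 1) (if 0 < c then 0 else c)
            (ans ++ if 0 < c then [c] else []) := by
      show solLoopA ((fuel + k) + 1) (p :: pr) (s :: sp) t c ans = _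
      by_cases hcp : 0 < c <;> simp [solLoopA, hnot, hcp]
    have hwait' : ∀ j : Nat, j < k → p + ((t + 1) + (j : Int)) * s < 100 := by
      intro j hj
      have := hwait (j + 1) (by omega)
      push_cast at this ⊢; linarith
    rw [hstep]
    by_cases hcp : 0 < c
    · rw [if_pos hcp, if_pos hcp,
        ih (fuel) p s pr sp (t + 1) 0 (ans ++ [c]) le_rfl hwait']
      have ht : t + 1 + (k : Int) = t + ((k : Nat) + 1 : Nat) := by push_cast; ring
      rw [ht]
      split_ifs <;> simp_all
    · have hc0 : c = 0 := by omega
      rw [if_neg hcp, if_neg hcp, List.append_nil,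
        ih (fuel) p s pr sp (t + 1) c (ans) (by omega) hwait']
      have ht : t + 1 + (k : Int) = t + ((k : Nat) + 1 : Nat) := by push_cast; ring
      rw [ht]
      split_ifs <;> simp_all

-- main simulation lemma: A's loop from a matching state equals B's fold over the remaining days
lemma solLoopA_eq_fold : ∀ (progress speeds : List Int) (fuel : Nat) (t c : Int)
    (cur : Option Int) (cnt : Int) (ans : List Int),
    progress.length ≤ speeds.length →
    (∀ q ∈ progress.zip speeds, 0 < q.2) →
    0 ≤ t →
    ((cur = some t ∧ cnt = c ∧ 1 ≤ c) ∨ (cur = none ∧ cnt = 0 ∧ c = 0 ∧ t = 0)) →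
    fuelB progress ≤ fuel →
    solLoopA fuel progress speeds t c ans =
      (match (pyDays progress speeds).foldl bStep (ans, cur, cnt) with
       | (a, _, k) => a ++ [k]) := by
  intro progress
  induction progress with
  | nil =>
    intro speeds fuel t c cur cnt ans _ _ _ hrel _
    have hcnt : cnt = c := by rcases hrel with ⟨_, h, _⟩ | ⟨_, h1, h2, _⟩ <;> omega
    cases fuel <;> simp [solLoopA, pyDays, hcnt]
  | cons p pr ih =>
    intro speeds fuel t c cur cnt ans hlen hpos ht hrel hfuel
    match speeds with
    | [] => simp at hlen
    | s :: sp =>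
      have hs : 0 < s := hpos (p, s) (by simp)
      have hpos' : ∀ q ∈ pr.zip sp, 0 < q.2 := fun q hq => hpos q (by simp [hq])
      have hlen' : pr.length ≤ sp.length := by simpa using hlen
      -- the head's completion day and its clamp
      set d : Int := -(PySem.Int.floordiv (p - 100) s) with hd
      set dc : Int := max 0 d with hdc
      have hdays : pyDays (p :: pr) (s :: sp) = dc :: pyDays pr sp := by
        simp [pyDays, hdc, hd]
      have hfuel1 : 1 + (100 - p).toNat + fuelB pr ≤ fuel := by
        have : fuelB (p :: pr) = 1 + (100 - p).toNat + fuelB pr := by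
          simp [fuelB]; omega
        omega
      obtain ⟨fuel', rfl⟩ : ∃ f, fuel = f + 1 := ⟨fuel - 1, by omega⟩
      by_cases hready : 100 ≤ p + t * s
      · -- head finishes now: A pops, B joins the current group
        have hdt : d ≤ t := (ready_iff p s t hs).mp hready
        have hdct : dc ≤ t := by omega
        have hstep : solLoopA (fuel' + 1) (p :: pr) (s :: sp) t c ans
            = solLoopA fuel' pr sp t (c + 1) ans := by simp [solLoopA, hready]
        rw [hstep, hdays]
        rcases hrel with ⟨hcur, hcnt, hc1⟩ | ⟨hcur, hcnt, hc0, ht0⟩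
        · have hb : bStep (ans, cur, cnt) dc = (ans, some t, cnt + 1) := by
            simp [bStep, hcur, not_lt.mpr hdct]
          rw [List.foldl_cons, hb, hcnt]
          exact ih sp fuel' t (c + 1) (some t) (c + 1) ans hlen' hpos' ht
            (Or.inl ⟨rfl, rfl, by omega⟩) (by omega)
        · have hdc0 : dc = t := by omega
          have hb : bStep (ans, cur, cnt) dc = (ans, some dc, 1) := by
            simp [bStep, hcur]
          rw [hdc0] at hb; rw [List.foldl_cons, hdc0, hb, hc0]
          exact ih sp fuel' t (0 + 1) (some t) 1 ans hlen' hpos' ht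
            (Or.inl ⟨rfl, by omega, by omega⟩) (by omega)
      · -- head not finished: A waits (d - t) days, flushing the count, then pops
        have hdt : t < d := by
          by_contra h
          exact hready ((ready_iff p s t hs).mpr (by omega))
        have hd0 : 0 < d := by omega
        have hdcd : dc = d := by omega
        set k : Nat := (d - t).toNat with hk
        have hkd : t + (k : Int) = d := by omega
        have hkb : (k : Int) ≤ (100 - p).toNat := by
          have := day_le p s hs
          omega
        obtain ⟨f3, hf3, hf3b⟩ : ∃ f3, fuel' + 1 = (f3 + 1) + k ∧ fuelB pr ≤ f3 :=
          ⟨fuel' - k, by omega, by omega⟩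
        have hwait : ∀ j : Nat, j < k → p + (t + (j : Int)) * s < 100 := by
          intro j hj
          have hjd : t + (j : Int) < d := by omega
          by_contra h
          have := (ready_iff p s (t + (j : Int)) hs).mp (by omega)
          omega
        have hcge : 0 ≤ c := by
          rcases hrel with ⟨_, _, h⟩ | ⟨_, _, h, _⟩ <;> omega
        rw [hf3, solLoopA_wait k (f3 + 1) p s pr sp t c ans hcge hwait]
        have hk0 : k ≠ 0 := by omega
        rw [if_neg hk0, hkd]
        have hreadyd : 100 ≤ p + d * s := (ready_iff p s d hs).mpr le_rfl
        have hstep : solLoopA (f3 + 1) (p :: pr) (s :: sp) d 0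
              (ans ++ if k ≠ 0 ∧ 0 < c then [c] else [])
            = solLoopA f3 pr sp d (0 + 1)
              (ans ++ if k ≠ 0 ∧ 0 < c then [c] else []) := by
          simp [solLoopA, hreadyd]
        rw [hstep, hdays]
        rcases hrel with ⟨hcur, hcnt, hc1⟩ | ⟨hcur, hcnt, hc0, ht0⟩
        · have hb : bStep (ans, cur, cnt) dc = (ans ++ [cnt], some dc, 1) := by
            simp [bStep, hcur]; omega
          rw [List.foldl_cons, hb]
          have hap : (ans ++ if k ≠ 0 ∧ 0 < c then [c] else []) = ans ++ [cnt] := by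
            rw [if_pos ⟨hk0, by omega⟩, hcnt]
          rw [hap, hdcd]
          exact ih sp f3 d (0 + 1) (some d) 1 (ans ++ [cnt]) hlen' hpos' (by omega)
            (Or.inl ⟨rfl, by omega, by omega⟩) hf3b
        · have hb : bStep (ans, cur, cnt) dc = (ans, some dc, 1) := by
            simp [bStep, hcur]
          rw [List.foldl_cons, hb]
          have hap : (ans ++ if k ≠ 0 ∧ 0 < c then [c] else []) = ans := by
            rw [if_neg (by omega), List.append_nil]
          rw [hap, hdcd]
          exact ih sp f3 d (0 + 1) (some d) 1 ans hlen' hpos' (by omega)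
            (Or.inl ⟨rfl, by omega, by omega⟩) hf3b

-- ===== VERDICT (by name: the statement is the Claim_ definition above) =====
theorem solution_spec : Claim_equal_solution := by
  intro progress speeds _ hpre
  obtain ⟨hlen, hpos⟩ := hpre
  unfold Spec_solution solution solution_alt
  rw [solLoopA_eq_fold progress speeds _ 0 0 none 0 [] hlen hpos le_rfl
    (Or.inr ⟨rfl, rfl, rfl, rfl⟩) (by simp [fuelB])]
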